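-- pv_equiv track=rewrite | github.com/shelbycoyle13/ls_core | PY101/PY101-PY109 small_problems/easy_3/easy_3_04.py | stringy
-- ===== SOURCE A (Python) =====
-- def stringy(integer):
--     new_string = ""
--     for i in range(0, integer):
--         if i % 2 == 0:
--             new_string += "1"
--         elif i % 2 == 1:
--             new_string += "0"
--         else:
--             return "You did not enter a positive integer."
--     return new_string
-- ===== SOURCE B (Python) =====
-- def stringy(integer):
--     return ("10" * ((integer + 1) // 2))[:integer]
-- ===== Notes on version B (the rewrite author's own statement) =====
-- stated objective: faster
-- what changed: Replaces the per-index loop with a modulo branch and repeated string concatenation by a closed form: repeat '10' ceil(n/2) times and slice to length n.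
import Mathlib
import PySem

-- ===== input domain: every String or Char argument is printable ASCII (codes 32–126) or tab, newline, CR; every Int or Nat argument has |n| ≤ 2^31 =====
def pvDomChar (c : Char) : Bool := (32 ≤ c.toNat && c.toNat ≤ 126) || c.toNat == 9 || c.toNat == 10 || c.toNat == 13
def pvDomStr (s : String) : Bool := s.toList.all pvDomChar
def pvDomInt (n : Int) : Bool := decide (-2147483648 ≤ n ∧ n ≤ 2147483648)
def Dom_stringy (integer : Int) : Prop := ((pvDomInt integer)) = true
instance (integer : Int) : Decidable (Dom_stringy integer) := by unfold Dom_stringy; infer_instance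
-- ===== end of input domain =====

-- B replaces A's per-index loop (with its modulo branch and unreachable error return)
-- by a closed form: repeat "10" ceil(n/2) times and slice to length n; simpler, no loop.

-- ===== PORT A =====
-- the for-loop over range(0, integer), accumulating new_string (as a char list);
-- the unreachable 'else: return …' branch is kept verbatim
def stringyLoop : List Int → List Char → String
  | [], acc => String.ofList acc
  | i :: rest, acc =>
    if PySem.Int.mod i 2 = 0 then stringyLoop rest (acc ++ ['1'])
    else if PySem.Int.mod i 2 = 1 then stringyLoop rest (acc ++ ['0'])
    else "You did not enter a positive integer."

def stringy (integer : Int) : String :=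
  stringyLoop (PySem.List.pyRange 0 integer) []

-- ===== PORT B =====
def stringy_alt (integer : Int) : String :=
  String.ofList (PySem.List.slice
    (PySem.List.pyRepeat ['1', '0'] (PySem.Int.floordiv (integer + 1) 2))
    none (some integer))

-- ===== PRECONDITION & SPEC =====
def Spec_stringy (integer : Int) (out : String) : Prop := out = stringy_alt integer
instance (integer : Int) (out : String) : Decidable (Spec_stringy integer out) := by unfold Spec_stringy; infer_instance

-- ===== CLAIM (what is proved, stated in full; the proofs are below) =====
def Claim_equal_stringy : Prop := ∀ (integer : Int), Dom_stringy integer → Spec_stringy integer (stringy integer)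

-- ===== LEMMAS AND PROOFS =====

-- A's loop appends exactly the parity character of each index
lemma stringyLoop_eq (l : List Int) (acc : List Char) :
    stringyLoop l acc =
      String.ofList (acc ++ l.map (fun i => if PySem.Int.mod i 2 = 0 then '1' else '0')) := by
  induction l generalizing acc with
  | nil => simp [stringyLoop]
  | cons i rest ih =>
    rcases PySem.Int.mod_two_eq i with h | h
    · have hd : (2 : Int) ∣ i := (PySem.Int.mod_eq_zero_iff_dvd i 2).mp h
      simp only [stringyLoop, h, ih, List.append_assoc, List.singleton_append]
      norm_num [hd]
    · have hd : ¬ (2 : Int) ∣ i := by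
        intro d
        rw [(PySem.Int.mod_eq_zero_iff_dvd i 2).mpr d] at h
        exact absurd h (by norm_num)
      simp only [stringyLoop, h, ih, List.append_assoc, List.singleton_append]
      norm_num [hd]

-- element i of k copies of "10" flattened
lemma flat_get (k : Nat) : ∀ i : Nat, i < 2 * k →
    ((List.replicate k ['1', '0']).flatten)[i]? =
      some (if i % 2 = 0 then '1' else '0') := by
  induction k with
  | zero => intro i h; omega
  | succ k ih =>
    intro i h
    match i with
    | 0 => simp [List.replicate_succ]
    | 1 => simp [List.replicate_succ]
    | (j+2) =>
      have hj : j < 2 * k := by omega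
      have := ih j hj
      simp [List.replicate_succ, this, Nat.add_mod_right]

-- the closed form's char list equals the loop's char list, for a natural length
lemma chars_eq (n : Nat) :
    ((List.replicate ((n + 1) / 2) ['1', '0']).flatten).take n =
      (PySem.List.pyRange 0 (n : Int)).map
        (fun i => if PySem.Int.mod i 2 = 0 then '1' else '0') := by
  apply List.ext_getElem?
  intro i
  rw [PySem.List.pyRange_one]
  simp only [List.map_map, Int.sub_zero, Int.toNat_natCast]
  by_cases hi : i < n
  · rw [List.getElem?_take_of_lt hi]
    rw [flat_get _ i (by omega)]
    rw [List.getElem?_map, List.getElem?_range hi]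
    simp only [Option.map_some, Function.comp_apply]
    have : PySem.Int.mod ((0 : Int) + (i : Nat)) 2 = ((i % 2 : Nat) : Int) := by
      simp only [Int.zero_add]
      exact PySem.Int.mod_natCast i 2
    rw [this]
    congr 1
    by_cases h2 : i % 2 = 0 <;> simp [h2] <;> omega
  · rw [List.getElem?_eq_none (by simp; omega), List.getElem?_eq_none]
    simp only [List.length_map, List.length_range]
    omega

-- ===== VERDICT (by name: the statement is the Claim_ definition above) =====
theorem stringy_spec : Claim_equal_stringy := by
  intro integer _
  unfold Spec_stringy stringy stringy_alt
  by_cases hpos : 0 < integer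
  · -- positive length: both are the alternating string of length `integer`
    obtain ⟨n, rfl⟩ : ∃ n : Nat, integer = (n : Int) :=
      ⟨integer.toNat, (Int.toNat_of_nonneg (le_of_lt hpos)).symm⟩
    rw [stringyLoop_eq, PySem.List.slice_to _ (Int.natCast_nonneg n)]
    have hfd : PySem.Int.floordiv ((n : Int) + 1) 2 = (((n + 1) / 2 : Nat) : Int) := by
      have := PySem.Int.floordiv_natCast (n + 1) 2
      push_cast at this ⊢
      exact this
    rw [hfd]
    unfold PySem.List.pyRepeat
    simp only [Int.toNat_natCast, List.nil_append]
    rw [chars_eq n]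
  · -- non-positive length: the range is empty and the repeated string is empty
    rw [PySem.List.pyRange_one_eq_nil (by omega)]
    have h0 : (PySem.Int.floordiv (integer + 1) 2).toNat = 0 := by
      rw [PySem.Int.floordiv_eq_ediv_of_pos (by omega)]
      omega
    unfold PySem.List.pyRepeat
    rw [h0]
    simp [stringyLoop, PySem.List.slice]
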